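-- pv_equiv track=rewrite | github.com/Rasmus256/advent_of_code | 2025/day6/part2/main.py | _find_column_runs
-- ===== SOURCE A (Python) =====
-- from typing import List, Tuple
--
-- def _find_column_runs(padded: List[str]) -> List[Tuple[int, int]]:
-- 	width = len(padded[0])
-- 	occupied = [any(row[col] != ' ' for row in padded) for col in range(width)]
-- 	runs: List[Tuple[int, int]] = []
-- 	start = None
-- 	for i, occ in enumerate(occupied):
-- 		if occ and start is None:
-- 			start = i
-- 		elif not occ and start is not None:
-- 			runs.append((start, i))
-- 			start = None
-- 	if start is not None:
-- 		runs.append((start, width))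
-- 	return runs
-- ===== SOURCE B (Python) =====
-- from typing import List, Tuple
--
-- def _find_column_runs(padded: List[str]) -> List[Tuple[int, int]]:
-- 	width = len(padded[0])
-- 	occupied = [any(row[col] != ' ' for row in padded) for col in range(width)]
-- 	prevs = [False] + occupied[:-1]
-- 	nexts = occupied[1:] + [False]
-- 	starts = [i for i, (p, c) in enumerate(zip(prevs, occupied)) if c and not p]
-- 	ends = [i + 1 for i, (c, n) in enumerate(zip(occupied, nexts)) if c and not n]
-- 	return list(zip(starts, ends))
-- ===== Notes on version B (the rewrite author's own statement) =====
-- stated objective: alternative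
-- what changed: Replaces A's stateful start/None scan (with its trailing special-case append) by boundary detection on shifted masks: run starts are columns occupied but whose left neighbour is not, run ends are columns occupied whose right neighbour is not, and the result is the positional zip of the two boundary lists.
import Mathlib
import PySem

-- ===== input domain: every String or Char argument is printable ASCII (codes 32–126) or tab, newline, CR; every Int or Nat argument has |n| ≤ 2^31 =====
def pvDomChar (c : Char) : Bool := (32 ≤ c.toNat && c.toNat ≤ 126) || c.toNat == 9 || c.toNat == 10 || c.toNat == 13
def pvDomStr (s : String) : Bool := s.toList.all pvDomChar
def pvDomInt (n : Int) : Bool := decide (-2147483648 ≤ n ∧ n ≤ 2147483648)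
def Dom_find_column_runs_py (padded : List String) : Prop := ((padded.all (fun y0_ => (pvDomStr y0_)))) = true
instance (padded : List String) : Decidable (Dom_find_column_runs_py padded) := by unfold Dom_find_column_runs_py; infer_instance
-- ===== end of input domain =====

-- B replaces A's stateful start/None scan by boundary detection on shifted masks
-- (starts and ends computed as separate lists, then zipped); same cost, different structure.

-- ===== PORT A =====
def find_column_runs_py (padded : List String) : List (Int × Int) :=
  let width : Int := PySem.Str.len ((PySem.List.pyGet? padded 0).getD "")
  let occupied : List Bool := (PySem.List.pyRange 0 width 1).map
    (fun col => padded.any (fun row => ((PySem.Str.pyGet? row col).getD ' ') != ' '))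
  let st := (PySem.List.enumerate occupied 0).foldl
    (fun (st : List (Int × Int) × Option Int) (p : Int × Bool) =>
      if p.2 && st.2.isNone then (st.1, some p.1)
      else if !p.2 && st.2.isSome then (st.1 ++ [(st.2.getD 0, p.1)], none)
      else st) ([], none)
  match st with
  | (runs, some s) => runs ++ [(s, width)]
  | (runs, none) => runs

-- ===== PORT B =====
def find_column_runs_py_alt (padded : List String) : List (Int × Int) :=
  let width : Int := PySem.Str.len ((PySem.List.pyGet? padded 0).getD "")
  let occupied : List Bool := (PySem.List.pyRange 0 width 1).map
    (fun col => padded.any (fun row => ((PySem.Str.pyGet? row col).getD ' ') != ' '))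
  let prevs : List Bool := [false] ++ PySem.List.slice occupied none (some (-1))
  let nexts : List Bool := PySem.List.slice occupied (some 1) none ++ [false]
  let starts : List Int := ((PySem.List.enumerate (prevs.zip occupied) 0).filter
      (fun p => p.2.2 && !p.2.1)).map (fun p => p.1)
  let ends : List Int := ((PySem.List.enumerate (occupied.zip nexts) 0).filter
      (fun p => p.2.1 && !p.2.2)).map (fun p => p.1 + 1)
  starts.zip ends

-- ===== PRECONDITION & SPEC =====
-- Pre_ excludes exactly the inputs where A raises IndexError: the empty list (padded[0]),
-- and inputs where some column's any() scan reaches a row shorter than width before any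
-- non-space character at that column (B raises identically there).
def Pre_find_column_runs_py (padded : List String) : Prop :=
  padded ≠ [] ∧
  ∀ col < (padded.headD "").toList.length, ∀ k < padded.length,
    ((padded.getD k "").toList.length ≤ col →
      ∃ j < k, ((padded.getD j "").toList.getD col ' ') ≠ ' ')
instance (padded : List String) : Decidable (Pre_find_column_runs_py padded) := by
  unfold Pre_find_column_runs_py; infer_instance

def pvWitness_find_column_runs_py : List String := ["x x", " xx"]

def Spec_find_column_runs_py (padded : List String) (out : List (Int × Int)) : Prop := out = find_column_runs_py_alt padded
instance (padded : List String) (out : List (Int × Int)) : Decidable (Spec_find_column_runs_py padded out) := by unfold Spec_find_column_runs_py; infer_instance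

-- ===== CLAIM (what is proved, stated in full; the proofs are below) =====
def Claim_equal_find_column_runs_py : Prop := ∀ (padded : List String), Dom_find_column_runs_py padded → Pre_find_column_runs_py padded → Spec_find_column_runs_py padded (find_column_runs_py padded)

-- ===== LEMMAS AND PROOFS =====

-- A's state machine, with the trailing append folded into the base case.
def scanA : List Bool → Int → Option Int → List (Int × Int)
  | [], _, none => []
  | [], i, some s => [(s, i)]
  | b :: bs, i, none => if b then scanA bs (i + 1) (some i) else scanA bs (i + 1) none
  | b :: bs, i, some s => if b then scanA bs (i + 1) (some s) else (s, i) :: scanA bs (i + 1) none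

-- Run starts: indices i with bs[i] and (i = 0 or not bs[i-1]); prev carries the left neighbour.
def runStarts (prev : Bool) (i : Int) : List Bool → List Int
  | [] => []
  | b :: bs => (if b && !prev then [i] else []) ++ runStarts b (i + 1) bs

-- Run ends (exclusive), backward form: opn says a run is currently open.
def runEndsO (opn : Bool) (i : Int) : List Bool → List Int
  | [] => if opn then [i] else []
  | b :: bs => (if opn && !b then [i] else []) ++ runEndsO b (i + 1) bs

-- Run ends, forward (lookahead) form: i+1 is an end when bs[i] and not bs[i+1] (or i last).
def runEndsF (i : Int) : List Bool → List Int
  | [] => []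
  | [b] => if b then [i + 1] else []
  | b :: c :: bs => (if b && !c then [i + 1] else []) ++ runEndsF (i + 1) (c :: bs)

theorem foldA_eq_scanA (bs : List Bool) : ∀ (i : Int) (runs : List (Int × Int)) (start : Option Int),
    (match (PySem.List.enumerate bs i).foldl
      (fun (st : List (Int × Int) × Option Int) (p : Int × Bool) =>
        if p.2 && st.2.isNone then (st.1, some p.1)
        else if !p.2 && st.2.isSome then (st.1 ++ [(st.2.getD 0, p.1)], none)
        else st) (runs, start) with
     | (rs, some s) => rs ++ [(s, i + (bs.length : Int))]
     | (rs, none) => rs)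
    = runs ++ scanA bs i start := by
  induction bs with
  | nil =>
    intro i runs start
    cases start <;> simp [PySem.List.enumerate_nil, scanA]
  | cons b bs ih =>
    intro i runs start
    rw [PySem.List.enumerate_cons, List.foldl_cons,
      show i + (((b :: bs).length : Nat) : Int) = (i + 1) + (bs.length : Int) by
        push_cast [List.length_cons]; ring]
    cases start with
    | none =>
      cases b with
      | true => simpa [scanA] using ih (i + 1) runs (some i)
      | false => simpa [scanA] using ih (i + 1) runs none
    | some s =>
      cases b with
      | true => simpa [scanA] using ih (i + 1) runs (some s)
      | false => simpa [scanA] using ih (i + 1) (runs ++ [(s, i)]) none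

theorem scanA_eq_zip (bs : List Bool) : ∀ (i : Int),
    scanA bs i none = (runStarts false i bs).zip (runEndsO false i bs) ∧
    ∀ s, scanA bs i (some s) = ((s :: runStarts true i bs).zip (runEndsO true i bs)) := by
  induction bs with
  | nil => intro i; exact ⟨by simp [scanA, runStarts, runEndsO],
      fun s => by simp [scanA, runStarts, runEndsO]⟩
  | cons b bs ih =>
    intro i
    obtain ⟨ih1, ih2⟩ := ih (i + 1)
    constructor
    · cases b with
      | true => simpa [scanA, runStarts, runEndsO] using ih2 i
      | false => simpa [scanA, runStarts, runEndsO] using ih1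
    · intro s
      cases b with
      | true => simpa [scanA, runStarts, runEndsO] using ih2 s
      | false => simpa [scanA, runStarts, runEndsO, List.zip] using ih1

theorem runEndsO_eq_F (bs : List Bool) : ∀ (opn : Bool) (i : Int),
    runEndsO opn i bs = (if opn && !(bs.headD false) then [i] else []) ++ runEndsF i bs := by
  induction bs with
  | nil => intro opn i; cases opn <;> simp [runEndsO, runEndsF]
  | cons b bs ih =>
    intro opn i
    rw [runEndsO, ih b (i + 1)]
    cases bs with
    | nil => cases b <;> cases opn <;> simp [runEndsF]
    | cons c bs' => cases b <;> cases opn <;> simp [runEndsF]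

theorem zip_cons_dropLast {α : Type} (l : List α) (x : α) :
    (x :: l.dropLast).zip l = (x :: l).zip l := by
  induction l generalizing x with
  | nil => rfl
  | cons b l ih =>
    cases l with
    | nil => rfl
    | cons c l' => simpa [List.zip_cons_cons] using congrArg (List.cons (x, b)) (ih b)

theorem starts_eq (bs : List Bool) : ∀ (prev : Bool) (i : Int),
    ((PySem.List.enumerate ((prev :: bs).zip bs) i).filter
      (fun p => p.2.2 && !p.2.1)).map (fun p => p.1) = runStarts prev i bs := by
  induction bs with
  | nil => intro prev i; simp [PySem.List.enumerate_nil, runStarts]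
  | cons b bs ih =>
    intro prev i
    rw [show (prev :: b :: bs).zip (b :: bs) = (prev, b) :: (b :: bs).zip bs from rfl,
      PySem.List.enumerate_cons]
    cases b <;> cases prev <;> simp [runStarts, ih]

theorem ends_eq (bs : List Bool) : ∀ (i : Int),
    ((PySem.List.enumerate (bs.zip (bs.drop 1 ++ [false])) i).filter
      (fun p => p.2.1 && !p.2.2)).map (fun p => p.1 + 1) = runEndsF i bs := by
  induction bs with
  | nil => intro i; simp [PySem.List.enumerate_nil, runEndsF]
  | cons b bs ih =>
    intro i
    cases bs with
    | nil => cases b <;> simp [PySem.List.enumerate_cons, PySem.List.enumerate_nil, runEndsF]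
    | cons c bs' =>
      rw [show (b :: c :: bs').zip ((b :: c :: bs').drop 1 ++ [false])
            = (b, c) :: (c :: bs').zip ((c :: bs').drop 1 ++ [false]) from rfl,
        PySem.List.enumerate_cons]
      have ih' := ih (i + 1)
      simp only [List.drop_succ_cons, List.drop_zero] at ih'
      cases b <;> cases c <;> simp [runEndsF, ih']

-- ===== VERDICT (by name: the statement is the Claim_ definition above) =====
theorem find_column_runs_py_spec : Claim_equal_find_column_runs_py := by
  intro padded _ _
  unfold Spec_find_column_runs_py find_column_runs_py find_column_runs_py_alt
  set width : Int := PySem.Str.len ((PySem.List.pyGet? padded 0).getD "") with hw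
  set occupied : List Bool := (PySem.List.pyRange 0 width 1).map
    (fun col => padded.any (fun row => ((PySem.Str.pyGet? row col).getD ' ') != ' ')) with hocc
  have hlen : (occupied.length : Int) = width := by
    have h0 : 0 ≤ width := by rw [hw]; simp [PySem.Str.len]
    rw [hocc, List.length_map, PySem.List.length_pyRange_one]
    omega
  have hA := foldA_eq_scanA occupied 0 [] none
  rw [hlen] at hA
  simp only [zero_add, List.nil_append] at hA
  rw [hA, (scanA_eq_zip occupied 0).1, runEndsO_eq_F occupied false 0]
  simp only [Bool.false_and, if_neg (by simp : ¬ (false = true)), List.nil_append]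
  rw [PySem.List.slice_to_neg_one, PySem.List.slice_from_one,
    show [false] ++ occupied.dropLast = false :: occupied.dropLast from rfl,
    zip_cons_dropLast, starts_eq occupied false 0,
    show occupied.tail = occupied.drop 1 from List.drop_one.symm,
    ends_eq occupied 0]
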